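-- pv_equiv track=rewrite | github.com/chenbehamir/DNA-Classification-Kaggle | kernelComputation.py | pSpectrumKernelFunction
-- ===== SOURCE A (Python) =====
-- def getSubString(mString, spectrum):
--     """
--     get substrings of length spectrum
--
--     Attributes:
--         mstring: the string to subdivise
--         spectrum : the length of the substrings
--     return :
--         substrings of length spectrum
--     """
--     tmpList = []
--     mString = mString.lower()
--     if (spectrum == 0):
--         tmpList = ['']
--     else:
--         for i in range(len(mString)-spectrum+1):
--             mStringRes = ''
--             for j in range(spectrum):
--                 mStringRes += mString[i+j]
--             tmpList.append(mStringRes)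
--     return tmpList
--
-- def pSpectrumKernelFunction(mString1, mString2, spectrum):
--     """
--     compute the spectrum kernel of two strings
--
--     Attributes:
--         mstring1 : the first string
--         mstring2: the second string
--         spectrum : the length of substrings(spectrum used)
--     return :
--         spectrum kernel value
--     """
--
--     subString1 = getSubString(mString1, spectrum)
--     subString2 = getSubString(mString2, spectrum)
--     kernel = 0
--     for i in subString1:
--         for j in subString2:
--             if (i==j):
--                 kernel += 1
--     return kernel
-- ===== SOURCE B (Python) =====
-- def _kmerCounts(s, k):
--     s = s.lower()
--     counts = {}
--     if k == 0:
--         counts[''] = 1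
--     elif k > 0:
--         for i in range(len(s) - k + 1):
--             sub = s[i:i+k]
--             counts[sub] = counts.get(sub, 0) + 1
--     return counts
--
-- def pSpectrumKernelFunction(mString1, mString2, spectrum):
--     c1 = _kmerCounts(mString1, spectrum)
--     c2 = _kmerCounts(mString2, spectrum)
--     return sum(n * c2.get(sub, 0) for sub, n in c1.items())
-- ===== Notes on version B (the rewrite author's own statement) =====
-- stated objective: faster
-- what changed: B builds one frequency dict of k-substrings per string (sliced directly, not char-by-char) and sums products of counts over the first dict's keys, replacing A's all-pairs comparison of the two substring lists.
-- intended difference: For negative spectrum A returns (len1-spectrum+1)*(len2-spectrum+1), the product of the lengths of two lists of empty strings its range arithmetic accidentally produces, while B returns 0 because there are no substrings of negative length, which is the intended kernel value. — e.g. on pSpectrumKernelFunction("a", "b", -1): A returns 9, B returns 0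
import Mathlib
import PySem

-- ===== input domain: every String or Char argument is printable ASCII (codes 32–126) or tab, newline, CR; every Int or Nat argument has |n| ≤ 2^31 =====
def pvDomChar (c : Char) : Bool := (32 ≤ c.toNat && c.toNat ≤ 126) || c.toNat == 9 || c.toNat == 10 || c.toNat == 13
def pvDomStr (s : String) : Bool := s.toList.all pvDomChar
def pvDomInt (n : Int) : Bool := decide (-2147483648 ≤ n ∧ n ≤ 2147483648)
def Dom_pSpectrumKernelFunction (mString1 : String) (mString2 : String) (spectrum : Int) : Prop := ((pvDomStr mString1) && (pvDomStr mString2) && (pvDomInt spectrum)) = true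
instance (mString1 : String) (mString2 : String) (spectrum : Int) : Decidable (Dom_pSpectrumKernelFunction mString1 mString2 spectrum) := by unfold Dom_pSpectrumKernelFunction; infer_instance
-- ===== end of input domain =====

-- B replaces A's all-pairs comparison of the two substring lists by one frequency dict per
-- string (substrings taken by slicing) and a sum of count products (objective: faster).

-- ===== PORT A =====
def pvGetSubString (mString : String) (spectrum : Int) : List (List Char) :=
  let cs := PySem.Chars.lower mString.toList
  if spectrum == 0 then [[]]
  else
    (PySem.List.pyRange 0 (PySem.List.len cs - spectrum + 1) 1).foldl
      (fun tmpList i =>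
        tmpList ++ [(PySem.List.pyRange 0 spectrum 1).foldl
          (fun mStringRes j => mStringRes ++ [PySem.List.pyGetD cs (i + j) ' ']) []])
      []

def pSpectrumKernelFunction (mString1 : String) (mString2 : String) (spectrum : Int) : Int :=
  let subString1 := pvGetSubString mString1 spectrum
  let subString2 := pvGetSubString mString2 spectrum
  subString1.foldl
    (fun kernel i =>
      subString2.foldl (fun kernel j => if i == j then kernel + 1 else kernel) kernel)
    0

-- ===== PORT B =====
def pvKmerCounts (s : String) (k : Int) : PySem.Dict (List Char) Int :=
  let cs := PySem.Chars.lower s.toList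
  if k == 0 then PySem.Dict.empty.insert [] 1
  else if 0 < k then
    (PySem.List.pyRange 0 (PySem.List.len cs - k + 1) 1).foldl
      (fun counts i =>
        let sub := PySem.List.slice cs (some i) (some (i + k))
        counts.insert sub (counts.getD sub 0 + 1))
      PySem.Dict.empty
  else PySem.Dict.empty

def pSpectrumKernelFunction_alt (mString1 : String) (mString2 : String) (spectrum : Int) : Int :=
  let c1 := pvKmerCounts mString1 spectrum
  let c2 := pvKmerCounts mString2 spectrum
  c1.items.foldl (fun acc p => acc + p.2 * c2.getD p.1 0) 0

-- ===== PRECONDITION & SPEC =====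
-- For negative spectrum A returns (len1-spectrum+1)*(len2-spectrum+1) — the product of the
-- lengths of two lists of empty strings its range arithmetic accidentally produces — while B
-- returns 0 because there are no substrings of negative length, the intended kernel value.
def D_pSpectrumKernelFunction (mString1 : String) (mString2 : String) (spectrum : Int) : Prop :=
  spectrum < 0
instance (mString1 : String) (mString2 : String) (spectrum : Int) : Decidable (D_pSpectrumKernelFunction mString1 mString2 spectrum) := by unfold D_pSpectrumKernelFunction; infer_instance

def Spec_pSpectrumKernelFunction (mString1 : String) (mString2 : String) (spectrum : Int) (out : Int) : Prop := ¬ D_pSpectrumKernelFunction mString1 mString2 spectrum → out = pSpectrumKernelFunction_alt mString1 mString2 spectrum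
instance (mString1 : String) (mString2 : String) (spectrum : Int) (out : Int) : Decidable (Spec_pSpectrumKernelFunction mString1 mString2 spectrum out) := by unfold Spec_pSpectrumKernelFunction; infer_instance

def pvDiffWitness_pSpectrumKernelFunction : String × String × Int := ("a", "b", -1)
def pvDiffWitnessOut_pSpectrumKernelFunction : Int × Int := (9, 0)

-- ===== CLAIM (what is proved, stated in full; the proofs are below) =====
def Claim_unchanged_pSpectrumKernelFunction : Prop := ∀ (mString1 : String) (mString2 : String) (spectrum : Int), Dom_pSpectrumKernelFunction mString1 mString2 spectrum → Spec_pSpectrumKernelFunction mString1 mString2 spectrum (pSpectrumKernelFunction mString1 mString2 spectrum)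
def Claim_changed_pSpectrumKernelFunction : Prop := Dom_pSpectrumKernelFunction (pvDiffWitness_pSpectrumKernelFunction.1) (pvDiffWitness_pSpectrumKernelFunction.2.1) (pvDiffWitness_pSpectrumKernelFunction.2.2) ∧ D_pSpectrumKernelFunction (pvDiffWitness_pSpectrumKernelFunction.1) (pvDiffWitness_pSpectrumKernelFunction.2.1) (pvDiffWitness_pSpectrumKernelFunction.2.2) ∧ pSpectrumKernelFunction (pvDiffWitness_pSpectrumKernelFunction.1) (pvDiffWitness_pSpectrumKernelFunction.2.1) (pvDiffWitness_pSpectrumKernelFunction.2.2) = pvDiffWitnessOut_pSpectrumKernelFunction.1 ∧ pSpectrumKernelFunction_alt (pvDiffWitness_pSpectrumKernelFunction.1) (pvDiffWitness_pSpectrumKernelFunction.2.1) (pvDiffWitness_pSpectrumKernelFunction.2.2) = pvDiffWitnessOut_pSpectrumKernelFunction.2 ∧ pvDiffWitnessOut_pSpectrumKernelFunction.1 ≠ pvDiffWitnessOut_pSpectrumKernelFunction.2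
def Claim_exact_pSpectrumKernelFunction : Prop := ∀ (mString1 : String) (mString2 : String) (spectrum : Int), Dom_pSpectrumKernelFunction mString1 mString2 spectrum → D_pSpectrumKernelFunction mString1 mString2 spectrum → pSpectrumKernelFunction mString1 mString2 spectrum ≠ pSpectrumKernelFunction_alt mString1 mString2 spectrum

-- ===== LEMMAS AND PROOFS =====

-- the common k-mer list both ports' substring collections reduce to (for spectrum > 0)
def pvKmers (cs : List Char) (k : Int) : List (List Char) :=
  (PySem.List.pyRange 0 (PySem.List.len cs - k + 1) 1).map
    (fun i => (cs.drop i.toNat).take k.toNat)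

theorem pv_map_range_getD (cs : List Char) (i0 k0 : Nat) (h : i0 + k0 ≤ cs.length) :
    (PySem.List.pyRange 0 (k0 : Int) 1).map (fun j => PySem.List.pyGetD cs ((i0 : Int) + j) ' ')
      = (cs.drop i0).take k0 := by
  rw [PySem.List.pyRange_one]
  simp only [sub_zero, Int.toNat_natCast, List.map_map]
  apply List.ext_getElem
  · simp; omega
  · intro n h1 h2
    simp only [List.getElem_map, List.getElem_range, Function.comp_apply]
    have : ((i0:Int) + (0 + (n:Int))) = ((i0 + n : Nat) : Int) := by push_cast; ring
    rw [this, PySem.List.pyGetD_natCast]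
    simp at h1 h2 ⊢
    rw [List.getElem?_eq_getElem (by omega : i0 + n < cs.length)]
    rfl

theorem pv_sub_A_eq (s : String) (k : Int) (hk : 0 < k) :
    pvGetSubString s k = pvKmers (PySem.Chars.lower s.toList) k := by
  unfold pvGetSubString pvKmers
  have hne : (k == 0) = false := by simp; omega
  rw [hne]
  simp only [Bool.false_eq_true, if_false]
  rw [PySem.List.foldl_append_singleton_eq_map, List.nil_append]
  apply List.map_congr_left
  intro i hi
  rw [PySem.List.mem_pyRange_one] at hi
  rw [PySem.List.foldl_append_singleton_eq_map, List.nil_append]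
  obtain ⟨i0, rfl⟩ : ∃ i0 : Nat, i = (i0 : Int) := ⟨i.toNat, by omega⟩
  obtain ⟨k0, rfl⟩ : ∃ k0 : Nat, k = (k0 : Int) := ⟨k.toNat, by omega⟩
  rw [pv_map_range_getD]
  · simp
  · simp [PySem.List.len_eq] at hi; omega

theorem pv_dict_B_eq (s : String) (k : Int) (hk : 0 < k) :
    pvKmerCounts s k = PySem.Dict.counter (pvKmers (PySem.Chars.lower s.toList) k) := by
  unfold pvKmerCounts pvKmers
  have hne : (k == 0) = false := by simp; omega
  rw [hne]
  simp only [Bool.false_eq_true, if_false, if_pos hk]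
  rw [← PySem.Dict.foldl_insert_getD_add_one_eq_counter, List.foldl_map]
  apply PySem.List.foldl_congr_mem
  intro acc i hi
  rw [PySem.List.mem_pyRange_one] at hi
  have hsl : PySem.List.slice (PySem.Chars.lower s.toList) (some i) (some (i + k))
      = ((PySem.Chars.lower s.toList).drop i.toNat).take k.toNat := by
    rw [PySem.List.slice_toNat _ (by omega) (by omega)]
    congr 1
    omega
  rw [hsl]

theorem pv_A_sum (L1 L2 : List (List Char)) :
    L1.foldl (fun kernel i =>
        L2.foldl (fun kernel j => if i == j then kernel + 1 else kernel) kernel) 0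
      = (L1.map (fun x => (L2.count x : Int))).sum := by
  have hin : ∀ (a : Int) (i : List Char),
      L2.foldl (fun kernel j => if i == j then kernel + 1 else kernel) a
        = a + (L2.count i : Int) := by
    intro a i
    have h2 : ∀ (acc : Int) (x : List Char), x ∈ L2 →
        (if i == x then acc + 1 else acc) = (if x == i then acc + 1 else acc) := by
      intro acc x _; rw [BEq.comm]
    exact (PySem.List.foldl_congr_mem L2 _ _ a h2).trans (PySem.List.foldl_beq_add_one L2 i a)
  calc L1.foldl (fun kernel i =>
        L2.foldl (fun kernel j => if i == j then kernel + 1 else kernel) kernel) 0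
      = L1.foldl (fun kernel i => kernel + (L2.count i : Int)) 0 := by
        apply PySem.List.foldl_congr_mem; intro acc x _; exact hin acc x
    _ = (L1.map (fun x => (L2.count x : Int))).sum := by
        rw [PySem.List.foldl_add]; simp

theorem pv_B_sum (L1 L2 : List (List Char)) :
    (PySem.Dict.counter L1).items.foldl
        (fun acc p => acc + p.2 * (PySem.Dict.counter L2).getD p.1 0) 0
      = ((PySem.Set.ofList L1).map
          (fun kk => (L1.count kk : Int) * (L2.count kk : Int))).sum := by
  rw [PySem.List.foldl_add, PySem.Dict.items_counter, List.map_map]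
  simp [Function.comp_def, PySem.Dict.getD_counter]

theorem pv_sum_ite (ks : List (List Char)) (hnd : ks.Nodup) (f : List Char → Int)
    (y : List Char) (h0 : y ∉ ks → f y = 0) :
    (ks.map (fun kk => if kk == y then f kk else 0)).sum = f y := by
  induction ks with
  | nil => simp [h0 (by simp)]
  | cons a t ih =>
    rw [List.nodup_cons] at hnd
    by_cases hay : a = y
    · subst hay
      simp only [List.map_cons, List.sum_cons, beq_self_eq_true, if_pos]
      have : (t.map (fun kk => if kk == a then f kk else 0)).sum = 0 := by
        apply List.sum_eq_zero
        intro x hx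
        rw [List.mem_map] at hx
        obtain ⟨kk, hkk, rfl⟩ := hx
        have : kk ≠ a := fun h => hnd.1 (h ▸ hkk)
        simp [this]
      rw [this]; ring
    · simp only [List.map_cons, List.sum_cons]
      rw [if_neg (by simp [hay])]
      rw [ih hnd.2 (fun hy => h0 (by
        intro hm
        rcases List.mem_cons.mp hm with h | h
        · exact hay h.symm
        · exact hy h))]
      ring

theorem pv_group (L1 L2 : List (List Char)) :
    ((PySem.Set.ofList L1).map (fun kk => (L1.count kk : Int) * (L2.count kk : Int))).sum
      = (L1.map (fun x => (L2.count x : Int))).sum := by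
  induction L2 with
  | nil => simp
  | cons y t ih =>
    have hc : ∀ x : List Char, ((y :: t).count x : Int)
        = (t.count x : Int) + (if x == y then 1 else 0) := by
      intro x
      rw [List.count_cons, BEq.comm]
      split_ifs <;> simp
    calc ((PySem.Set.ofList L1).map
            (fun kk => (L1.count kk : Int) * ((y :: t).count kk : Int))).sum
        = ((PySem.Set.ofList L1).map
            (fun kk => (L1.count kk : Int) * (t.count kk : Int)
              + (if kk == y then (L1.count kk : Int) else 0))).sum := by
          apply congrArg
          apply List.map_congr_left
          intro kk _
          rw [hc kk]
          split_ifs with h <;> ring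
      _ = ((PySem.Set.ofList L1).map
            (fun kk => (L1.count kk : Int) * (t.count kk : Int))).sum
          + ((PySem.Set.ofList L1).map
            (fun kk => if kk == y then (L1.count kk : Int) else 0)).sum := by
          rw [← List.sum_map_add]
      _ = (L1.map (fun x => (t.count x : Int))).sum + (L1.count y : Int) := by
          rw [ih, pv_sum_ite _ (PySem.Set.nodup_ofList L1) _ y]
          intro hy
          rw [PySem.Set.mem_ofList] at hy
          simp [List.count_eq_zero_of_not_mem hy]
      _ = (L1.map (fun x => ((y :: t).count x : Int))).sum := by
          have : L1.map (fun x => ((y :: t).count x : Int))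
              = L1.map (fun x => (t.count x : Int) + (if x == y then 1 else 0)) := by
            apply List.map_congr_left; intro x _; rw [hc x]
          rw [this, List.sum_map_add]
          congr 1
          rw [PySem.List.sum_map_ite_one_zero]
          simp [List.count]

-- ===== VERDICT (by name: the statement is the Claim_ definition above) =====
theorem pSpectrumKernelFunction_spec : Claim_unchanged_pSpectrumKernelFunction := by
  intro s1 s2 k _ hD
  have hk : 0 ≤ k := by
    unfold D_pSpectrumKernelFunction at hD; omega
  rcases lt_or_eq_of_le hk with hpos | hzero
  · show pSpectrumKernelFunction s1 s2 k = pSpectrumKernelFunction_alt s1 s2 k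
    unfold pSpectrumKernelFunction pSpectrumKernelFunction_alt
    rw [pv_sub_A_eq s1 k hpos, pv_sub_A_eq s2 k hpos,
        pv_dict_B_eq s1 k hpos, pv_dict_B_eq s2 k hpos,
        pv_A_sum, pv_B_sum, pv_group]
  · subst hzero
    rfl

theorem pSpectrumKernelFunction_changed : Claim_changed_pSpectrumKernelFunction := by
  unfold Claim_changed_pSpectrumKernelFunction; decide

theorem pSpectrumKernelFunction_tight : Claim_exact_pSpectrumKernelFunction := by
  intro s1 s2 k _ hD
  unfold D_pSpectrumKernelFunction at hD
  have hB : pSpectrumKernelFunction_alt s1 s2 k = 0 := by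
    unfold pSpectrumKernelFunction_alt pvKmerCounts
    rw [if_neg (by simp; omega), if_neg (by omega)]
    rfl
  have hsub : ∀ s : String, pvGetSubString s k
      = List.replicate (PySem.List.pyRange 0
          (PySem.List.len (PySem.Chars.lower s.toList) - k + 1) 1).length [] := by
    intro s
    unfold pvGetSubString
    rw [if_neg (by simp; omega)]
    rw [PySem.List.pyRange_one_eq_nil (by omega : k ≤ 0)]
    simp only [List.foldl_nil]
    rw [PySem.List.foldl_append_singleton_eq_map, List.nil_append, List.map_const']
  have hlen : ∀ s : String, 0 < (PySem.List.pyRange 0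
      (PySem.List.len (PySem.Chars.lower s.toList) - k + 1) 1).length := by
    intro s
    rw [PySem.List.length_pyRange_one]
    have : 0 ≤ PySem.List.len (PySem.Chars.lower s.toList) := by
      simp [PySem.List.len_eq]
    omega
  have hA : pSpectrumKernelFunction s1 s2 k ≠ 0 := by
    unfold pSpectrumKernelFunction
    rw [hsub s1, hsub s2, pv_A_sum]
    rw [List.map_replicate, List.count_replicate_self, List.sum_replicate, nsmul_eq_mul]
    have h1 := hlen s1
    have h2 := hlen s2
    positivity
  rw [hB]
  exact hA
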